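-- pv_equiv track=rewrite | github.com/ruiqi-zhong/SemanticScaffold | src/parse/str_util.py | split_keep_space
-- ===== SOURCE A (Python) =====
-- def split_keep_space(t, offset):
--     prev_space, seg_symbols = None, [0]
--     for idx, c in enumerate(t):
--         if c == ' ' or prev_space:
--             seg_symbols.append(idx)
--         prev_space = (c == ' ')
--     seg_symbols.append(len(t))
--     result = [(t[seg_symbols[i]:seg_symbols[i + 1]], seg_symbols[i] + offset) for i in range(len(seg_symbols) - 1)]
--     post_process = []
--     for r in result:
--         if len(r[0]) >= 2 and r[0][-2:] == '\\n':
--             post_process.append((r[0][:-2], r[1]))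
--             post_process.append(('\\n', r[1] + len(r[0][:-2])))
--         else:
--             post_process.append(r)
--     assert ''.join([x[0] for x in post_process]) == t
--     return post_process
-- ===== SOURCE B (Python) =====
-- # Single-pass state machine: scan once, keeping the current non-space run and its
-- # start index; emit runs and spaces as they complete (splitting a trailing '\n'
-- # literal inline), instead of A's three phases (breakpoint list, slicing, post-pass).
-- def split_keep_space(t, offset):
--     if not t:
--         return [('', offset)]
--     out = []
--     acc, start = '', 0
--     for i, c in enumerate(t):
--         if c == ' ':
--             if acc or i == 0:
--                 _emit(out, acc, start + offset)
--             out.append((' ', i + offset))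
--             acc, start = '', i + 1
--         else:
--             if not acc:
--                 start = i
--             acc += c
--     if acc:
--         _emit(out, acc, start + offset)
--     return out
--
-- def _emit(out, seg, pos):
--     if len(seg) >= 2 and seg[-2:] == '\\n':
--         out.append((seg[:-2], pos))
--         out.append(('\\n', pos + len(seg) - 2))
--     else:
--         out.append((seg, pos))
-- ===== Notes on version B (the rewrite author's own statement) =====
-- stated objective: alternative
-- what changed: A's three phases (collect breakpoint indices with a prev-space flag, slice between adjacent breakpoints, then a post-pass splitting trailing '\n' literals) are replaced by a single-pass state machine that keeps the current non-space run and its start index and emits each token (splitting a trailing '\n' inline) as it completes.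
import Mathlib
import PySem

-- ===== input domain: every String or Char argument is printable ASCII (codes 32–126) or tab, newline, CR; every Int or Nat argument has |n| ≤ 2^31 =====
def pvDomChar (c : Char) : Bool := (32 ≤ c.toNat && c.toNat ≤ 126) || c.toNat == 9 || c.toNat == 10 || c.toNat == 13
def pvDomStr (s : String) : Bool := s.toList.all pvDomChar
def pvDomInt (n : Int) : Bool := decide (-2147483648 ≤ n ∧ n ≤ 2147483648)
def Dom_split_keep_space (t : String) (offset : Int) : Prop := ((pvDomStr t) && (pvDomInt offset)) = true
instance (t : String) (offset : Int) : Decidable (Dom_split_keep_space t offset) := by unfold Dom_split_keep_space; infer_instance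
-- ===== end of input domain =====

-- B replaces A's three phases (breakpoint-index list, slicing pass, '\n'-splitting post-pass)
-- by one single-pass state machine emitting tokens as they complete; objective: alternative (same cost, different structure).

-- ===== PORT A =====
-- literal transliteration of Source A; Python's initial prev_space = None is modelled as false
-- (both are falsy in `c == ' ' or prev_space`); the always-true assert is a no-op and not ported.
def split_keep_space (t : String) (offset : Int) : List (String × Int) :=
  let cs := t.toList
  let st := (PySem.List.enumerate cs 0).foldl
    (fun (st : List Int × Bool) ic =>
      (if ic.2 == ' ' || st.2 then st.1 ++ [ic.1] else st.1, ic.2 == ' '))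
    ([0], false)
  let segSymbols := st.1 ++ [PySem.List.len cs]
  let result : List (List Char × Int) :=
    (PySem.List.pyRange 0 (PySem.List.len segSymbols - 1) 1).map
      (fun i =>
        (PySem.List.slice cs (some (PySem.List.pyGetD segSymbols i 0)) (some (PySem.List.pyGetD segSymbols (i + 1) 0)),
         PySem.List.pyGetD segSymbols i 0 + offset))
  result.foldl
    (fun pp r =>
      pp ++ (if 2 ≤ r.1.length ∧ PySem.List.slice r.1 (some (-2)) none = ['\\', 'n'] then
        [(String.ofList (PySem.List.slice r.1 none (some (-2))), r.2),
         ("\\n", r.2 + PySem.List.len (PySem.List.slice r.1 none (some (-2))))]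
      else [(String.ofList r.1, r.2)]))
    []

-- ===== PORT B =====
-- transliteration of Source B's _emit
def pvBEmit (seg : List Char) (pos : Int) : List (String × Int) :=
  if 2 ≤ seg.length ∧ PySem.List.slice seg (some (-2)) none = ['\\', 'n'] then
    [(String.ofList (PySem.List.slice seg none (some (-2))), pos),
     ("\\n", pos + seg.length - 2)]
  else [(String.ofList seg, pos)]

-- transliteration of Source B's scanning loop (state: current run `acc`, its start index `start`)
def pvBGo (offset : Int) : List Char → Int → List Char → Int → List (String × Int)
  | [], _, acc, start => if acc = [] then [] else pvBEmit acc (start + offset)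
  | c :: rest, i, acc, start =>
    if c == ' ' then
      (if acc ≠ [] ∨ i = 0 then pvBEmit acc (start + offset) else [])
        ++ ((" ", i + offset) :: pvBGo offset rest (i + 1) [] (i + 1))
    else
      pvBGo offset rest (i + 1) (acc ++ [c]) (if acc = [] then i else start)

def split_keep_space_alt (t : String) (offset : Int) : List (String × Int) :=
  if t.toList = [] then [("", offset)] else pvBGo offset t.toList 0 [] 0

-- ===== PRECONDITION & SPEC =====
def Spec_split_keep_space (t : String) (offset : Int) (out : List (String × Int)) : Prop := out = split_keep_space_alt t offset
instance (t : String) (offset : Int) (out : List (String × Int)) : Decidable (Spec_split_keep_space t offset out) := by unfold Spec_split_keep_space; infer_instance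

-- ===== CLAIM (what is proved, stated in full; the proofs are below) =====
def Claim_equal_split_keep_space : Prop := ∀ (t : String) (offset : Int), Dom_split_keep_space t offset → Spec_split_keep_space t offset (split_keep_space t offset)

-- ===== LEMMAS AND PROOFS =====

-- A's breakpoint indices, relative to the current position, computed structurally
def pvMarks : Bool → List Char → List Nat
  | _, [] => []
  | prev, c :: r => (if c == ' ' || prev then [0] else []) ++ (pvMarks (c == ' ') r).map (· + 1)

def pvLastSp : Bool → List Char → Bool
  | prev, [] => prev
  | _, c :: r => pvLastSp (c == ' ') r

def pvPairs {α : Type} (l : List α) : List (α × α) := l.zip l.tail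

def pvSliceN (cs : List Char) (a b : Nat) : List Char := (cs.drop a).take (b - a)

-- A's whole pipeline, reformulated: adjacent breakpoint pairs → slices → emitted tokens
def pvOut (cs : List Char) (base : Int) (L : List Nat) : List (String × Int) :=
  (pvPairs L).flatMap (fun p => pvBEmit (pvSliceN cs p.1 p.2) ((p.1 : Int) + base))

lemma pvFold (cs : List Char) : ∀ (s : Int) (prev : Bool) (acc : List Int),
    (PySem.List.enumerate cs s).foldl
      (fun (st : List Int × Bool) ic =>
        (if ic.2 == ' ' || st.2 then st.1 ++ [ic.1] else st.1, ic.2 == ' '))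
      (acc, prev)
    = (acc ++ (pvMarks prev cs).map (fun k : Nat => s + k), pvLastSp prev cs) := by
  induction cs with
  | nil => intro s prev acc; simp [pvMarks, pvLastSp, PySem.List.enumerate]
  | cons c r ih =>
    intro s prev acc
    rw [PySem.List.enumerate_cons]
    simp only [List.foldl_cons]
    rw [ih]
    have hm : pvMarks prev (c :: r) = (if c == ' ' || prev then [0] else []) ++ (pvMarks (c == ' ') r).map (· + 1) := rfl
    have hl : pvLastSp prev (c :: r) = pvLastSp (c == ' ') r := rfl
    rw [hm, hl]
    have he : (pvMarks (c == ' ') r).map ((fun k : Nat => s + k) ∘ (· + 1)) = (pvMarks (c == ' ') r).map (fun k : Nat => s + 1 + k) := by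
      apply List.map_congr_left; intro k _; simp; ring
    by_cases h : (c == ' ' || prev) = true
    · simp [h, List.map_map, he]
    · simp [h, List.map_map, he]

lemma pvAdjMap {β : Type} (L : List Int) (g : Int → Int → β) :
    (PySem.List.pyRange 0 (PySem.List.len L - 1) 1).map
      (fun i => g (PySem.List.pyGetD L i 0) (PySem.List.pyGetD L (i + 1) 0))
    = (pvPairs L).map (fun p => g p.1 p.2) := by
  apply List.ext_getElem
  · simp [PySem.List.length_pyRange_one, pvPairs, PySem.List.len_eq]
  · intro k h1 h2
    simp only [PySem.List.length_pyRange_one, List.length_map, PySem.List.len_eq] at h1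
    have hk : k + 1 < L.length := by omega
    simp only [List.getElem_map, PySem.List.getElem_pyRange_one, pvPairs, List.getElem_zip]
    have e1 : (0 : Int) + (k : Nat) = ((k : Nat) : Int) := by ring
    have e2 : (0 : Int) + (k : Nat) + 1 = (((k + 1 : Nat)) : Int) := by push_cast; ring
    rw [e2, e1, PySem.List.pyGetD_natCast, PySem.List.pyGetD_natCast,
      List.getD_eq_getElem L 0 (by omega), List.getD_eq_getElem L 0 hk]
    congr 1
    exact (List.getElem_tail ..).symm

lemma pvPairs_map {α β : Type} (f : α → β) (l : List α) :
    pvPairs (l.map f) = (pvPairs l).map (Prod.map f f) := by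
  simp [pvPairs, ← List.map_tail, List.zip_map]

lemma pvEmitA_eq (seg : List Char) (pos : Int) :
    (if 2 ≤ seg.length ∧ PySem.List.slice seg (some (-2)) none = ['\\', 'n'] then
        [(String.ofList (PySem.List.slice seg none (some (-2))), pos),
         ("\\n", pos + PySem.List.len (PySem.List.slice seg none (some (-2))))]
      else [(String.ofList seg, pos)]) = pvBEmit seg pos := by
  unfold pvBEmit
  by_cases h : 2 ≤ seg.length ∧ PySem.List.slice seg (some (-2)) none = ['\\', 'n']
  · rw [if_pos h, if_pos h]
    rw [PySem.List.slice_to_neg_ofNat seg 2 (by omega)]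
    have hlen : (PySem.List.len (seg.take (seg.length - 2)) : Int) = (seg.length : Int) - 2 := by
      simp [PySem.List.len_eq]
      omega
    rw [hlen]
    ring_nf
  · rw [if_neg h, if_neg h]

lemma pvShift (Y : List Nat) (w cs' : List Char) (base : Int) :
    pvOut (w ++ cs') base (Y.map (· + w.length)) =
    pvOut cs' ((w.length : Int) + base) Y := by
  unfold pvOut
  rw [pvPairs_map, List.flatMap_map]
  congr 1
  funext p
  have hs : pvSliceN (w ++ cs') (p.1 + w.length) (p.2 + w.length) = pvSliceN cs' p.1 p.2 := by
    unfold pvSliceN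
    rw [Nat.add_comm p.1 w.length]
    simp [List.drop_append, List.drop_eq_nil_of_le (by omega : w.length ≤ w.length + p.1)]
    congr 1
    omega
  simp only [Prod.map]
  rw [hs]
  congr 1
  push_cast
  ring

lemma pvMarksTrue (r : List Char) : ∃ Y', pvMarks true r ++ [r.length] = 0 :: Y' := by
  cases r with
  | nil => exact ⟨[], rfl⟩
  | cons c r' => exact ⟨(pvMarks (c == ' ') r').map (· + 1) ++ [r'.length + 1], by simp [pvMarks]⟩

lemma pvMarks_cons (prev : Bool) (c : Char) (r : List Char) :
    pvMarks prev (c :: r) = (if c == ' ' || prev then [0] else []) ++ (pvMarks (c == ' ') r).map (· + 1) := rfl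

lemma pvOut_cons2 (cs : List Char) (base : Int) (a b : Nat) (L : List Nat) :
    pvOut cs base (a :: b :: L) = pvBEmit (pvSliceN cs a b) ((a : Int) + base) ++ pvOut cs base (b :: L) := by
  simp [pvOut, pvPairs]

lemma pvOut_single (cs : List Char) (base : Int) (a : Nat) : pvOut cs base [a] = [] := rfl

lemma pvMain (cs : List Char) : ∀ (off start : Int) (acc : List Char), 0 ≤ start → (' ' ∉ acc) →
    (start + acc.length = 0 → cs ≠ []) →
    pvBGo off cs (start + acc.length) acc start =
      pvOut (acc ++ cs) (start + off)
        (if acc = [] ∧ 0 < start then pvMarks true cs ++ [cs.length]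
         else 0 :: (pvMarks false cs ++ [cs.length]).map (· + acc.length)) := by
  induction cs with
  | nil =>
    intro off start acc h0 hsp hne
    simp only [pvBGo]
    by_cases ha : acc = []
    · subst ha
      have hpos : 0 < start := by
        rcases h0.lt_or_eq with h | h
        · exact h
        · exact absurd rfl (hne (by simp [← h]))
      rw [if_pos rfl, if_pos ⟨rfl, hpos⟩]
      simp [pvOut, pvPairs, pvMarks]
    · rw [if_neg ha, if_neg (by simp [ha])]
      have hm : pvMarks false ([] : List Char) ++ [([] : List Char).length] = [0] := by simp [pvMarks]
      rw [hm]
      have hL : ([0] : List Nat).map (· + acc.length) = [acc.length] := by simp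
      rw [hL]
      have : pvOut (acc ++ []) (start + off) [0, acc.length] =
          pvBEmit (pvSliceN (acc ++ []) 0 acc.length) ((0 : Nat) + (start + off)) := by
        rw [pvOut_cons2, pvOut_single, List.append_nil]
      rw [this]
      have hslice : pvSliceN (acc ++ []) 0 acc.length = acc := by
        simp [pvSliceN]
      rw [hslice]
      norm_num
  | cons c r ih =>
    intro off start acc h0 hsp hne
    simp only [pvBGo]
    by_cases hc : (c == ' ') = true
    · rw [if_pos hc]
      have hc' : c = ' ' := by simpa using hc
      subst hc'
      obtain ⟨Y', hY⟩ := pvMarksTrue r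
      have hnn : (0 : Int) ≤ (acc.length : Int) := by positivity
      have hrec : pvBGo off r (start + (acc.length : Int) + 1) [] (start + (acc.length : Int) + 1) =
          pvOut r ((start + (acc.length : Int) + 1) + off) (0 :: Y') := by
        have h1 := ih off (start + (acc.length : Int) + 1) [] (by omega) (by simp)
          (by intro h; exfalso; simp at h; omega)
        simp only [List.length_nil, Nat.cast_zero, add_zero, List.nil_append] at h1
        rw [h1, if_pos ⟨trivial, by omega⟩, hY]
      have hemit1 : ∀ p : Int, pvBEmit [' '] p = [(" ", p)] := by
        intro p
        rw [pvBEmit, if_neg (by simp)]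
      have hm : pvMarks false (' ' :: r) ++ [(' ' :: r).length] = 0 :: (0 :: Y').map (· + 1) := by
        rw [pvMarks_cons]
        simp [List.map_append, ← hY]
      by_cases ha : acc = []
      · subst ha
        by_cases hz : start = 0
        · subst hz
          rw [if_pos (Or.inr (by simp))]
          rw [if_neg (by simp)]
          rw [hm]
          rw [hrec]
          simp only [List.length_nil, Nat.cast_zero, add_zero, zero_add, List.nil_append,
            List.map_id']
          rw [pvOut_cons2, List.map_cons, pvOut_cons2]
          have h1 : pvSliceN (' ' :: r) 0 0 = [] := rfl
          have h2 : pvSliceN (' ' :: r) 0 (0 + 1) = [' '] := rfl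
          have h3 : (0 + 1) :: List.map (fun x => x + 1) Y' = List.map (fun x => x + [' '].length) (0 :: Y') := by
            simp
          rw [h1, h2, hemit1, h3]
          have h4 : ' ' :: r = [' '] ++ r := rfl
          rw [h4, pvShift]
          simp
        · rw [if_neg (by simp [hz])]
          rw [if_pos ⟨rfl, by omega⟩]
          have hm2 : pvMarks true (' ' :: r) ++ [(' ' :: r).length] = 0 :: (0 :: Y').map (· + 1) := by
            rw [pvMarks_cons]
            simp [List.map_append, ← hY]
          rw [hm2, hrec]
          simp only [List.length_nil, Nat.cast_zero, add_zero, List.nil_append]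
          rw [List.map_cons, pvOut_cons2]
          have h2 : pvSliceN (' ' :: r) 0 (0 + 1) = [' '] := rfl
          have h3 : (0 + 1) :: List.map (fun x => x + 1) Y' = List.map (fun x => x + [' '].length) (0 :: Y') := by
            simp
          rw [h2, hemit1, h3]
          have h4 : ' ' :: r = [' '] ++ r := rfl
          rw [h4, pvShift]
          simp
          ring_nf
      · rw [if_pos (Or.inl ha)]
        rw [if_neg (by rintro ⟨h, _⟩; exact ha h)]
        rw [hm, hrec, List.map_cons, pvOut_cons2, List.map_map, List.map_cons, pvOut_cons2]
        simp only [Function.comp, Nat.zero_add]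
        have h1 : pvSliceN (acc ++ ' ' :: r) 0 acc.length = acc := by
          simp [pvSliceN]
        have h2 : pvSliceN (acc ++ ' ' :: r) acc.length (1 + acc.length) = [' '] := by
          simp [pvSliceN]
        rw [h1, h2, hemit1]
        have h3 : (1 + acc.length) :: List.map ((fun x => x + acc.length) ∘ fun x => x + 1) Y'
            = List.map (fun x => x + (acc ++ [' ']).length) (0 :: Y') := by
          simp only [List.map_cons, List.length_append, List.length_cons, List.length_nil]
          congr 1
          · omega
          · apply List.map_congr_left; intro x _; simp; omega
        rw [h3]
        have h4 : acc ++ ' ' :: r = (acc ++ [' ']) ++ r := by simp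
        rw [h4, pvShift]
        have h5 : (((acc ++ [' ']).length : Nat) : Int) + (start + off) = start + (acc.length : Int) + 1 + off := by
          simp only [List.length_append, List.length_cons, List.length_nil]
          push_cast
          ring
        rw [h5]
        simp
        ring
    · rw [if_neg hc]
      have hc' : (c == ' ') = false := by simpa using hc
      have hcne : ¬ (' ' = c) := by intro h; simp [← h] at hc'
      have hstart : (if acc = [] then start + (acc.length : Int) else start) = start := by
        by_cases h : acc = [] <;> simp [h]
      rw [hstart]
      have harg : start + (acc.length : Int) + 1 = start + ((acc ++ [c]).length : Int) := by
        simp only [List.length_append, List.length_cons, List.length_nil]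
        push_cast
        ring
      rw [harg]
      rw [ih off start (acc ++ [c]) h0
        (by simp [List.mem_append]; exact ⟨hsp, hcne⟩)
        (by intro h; exfalso; simp only [List.length_append, List.length_cons, List.length_nil] at h; push_cast at h; omega)]
      congr 1
      · simp
      · rw [if_neg (by simp)]
        by_cases hz : acc = [] ∧ 0 < start
        · rw [if_pos hz]
          obtain ⟨ha, _⟩ := hz; subst ha
          simp [pvMarks_cons, hc', List.map_append]
        · rw [if_neg hz]
          simp only [pvMarks_cons, hc', Bool.or_false, if_neg (by simp : ¬ (false : Bool) = true),
            List.nil_append, List.map_append, List.map_map, List.length_append, List.length_cons]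
          congr 1
          congr 1
          · apply List.map_congr_left; intro x _; simp [Function.comp]; omega
          · simp; omega

lemma pvA_eq (t : String) (offset : Int) :
    split_keep_space t offset = pvOut t.toList offset (0 :: pvMarks false t.toList ++ [t.toList.length]) := by
  rw [split_keep_space.eq_def]
  simp only [pvFold]
  have hseg : [(0:Int)] ++ List.map (fun k : Nat => (0:Int) + ↑k) (pvMarks false t.toList) ++ [PySem.List.len t.toList]
      = (0 :: pvMarks false t.toList ++ [t.toList.length]).map (fun k : Nat => (k : Int)) := by
    simp [PySem.List.len_eq]
  rw [hseg]
  rw [pvAdjMap _ (fun a b => (PySem.List.slice t.toList (some a) (some b), a + offset))]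
  rw [PySem.List.foldl_append_eq_flatMap]
  simp only [List.nil_append]
  rw [List.flatMap_map, pvPairs_map, List.flatMap_map]
  unfold pvOut
  congr 1
  funext p
  simp only [Prod.map]
  rw [pvEmitA_eq, PySem.List.slice_natCast]
  rfl

-- ===== VERDICT (by name: the statement is the Claim_ definition above) =====
theorem split_keep_space_spec : Claim_equal_split_keep_space := by
  intro t offset _
  unfold Spec_split_keep_space split_keep_space_alt
  rw [pvA_eq]
  by_cases h : t.toList = []
  · rw [h]; simp [pvOut, pvPairs, pvMarks, pvSliceN, pvBEmit]
  · rw [if_neg h]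
    have := pvMain t.toList offset 0 [] (by norm_num) (by simp) (by simpa using h)
    simp at this
    rw [this]
    simp
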